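-- pv_equiv track=rewrite | github.com/LukhasAI/vivox-research-pack | vivox/moral_alignment/vivox_mae_core.py | _are_actions_related
-- ===== SOURCE A (Python) =====
-- def _are_actions_related(action1: str, action2: str) -> bool:
--     """Check if two action types are related"""
--     # Define related action groups
--     related_groups = [
--         {"data_access", "access_resource", "read_data", "query_data"},
--         {"modify_settings", "update_configuration", "change_preferences"},
--         {"generate_content", "create_content", "produce_output"},
--         {"help_user", "assist_user", "provide_assistance"},
--         {"analyze_data", "process_data", "compute", "analyze"}
--     ]
--
--     for group in related_groups:
--         if action1 in group and action2 in group: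
--             return True
--
--     return False
-- ===== SOURCE B (Python) =====
-- # B: one-time flat index action -> group id, then two O(1) lookups (no per-call loop over groups).
-- _RELATED_GROUPS = [
--     ["data_access", "access_resource", "read_data", "query_data"],
--     ["modify_settings", "update_configuration", "change_preferences"],
--     ["generate_content", "create_content", "produce_output"],
--     ["help_user", "assist_user", "provide_assistance"],
--     ["analyze_data", "process_data", "compute", "analyze"],
-- ]
-- _ACTION_TO_GROUP = {a: i for i, g in enumerate(_RELATED_GROUPS) for a in g}
--
-- def _are_actions_related(action1: str, action2: str) -> bool:
--     """Check if two action types are related"""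
--     g1 = _ACTION_TO_GROUP.get(action1)
--     return g1 is not None and g1 == _ACTION_TO_GROUP.get(action2)
-- ===== Notes on version B (the rewrite author's own statement) =====
-- stated objective: idiomatic
-- what changed: Replaced the per-call loop over the five group sets with a flat action-to-group-index dict built once at module load; the function body becomes two lookups and an equality check (guarded against both being None).
import Mathlib
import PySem

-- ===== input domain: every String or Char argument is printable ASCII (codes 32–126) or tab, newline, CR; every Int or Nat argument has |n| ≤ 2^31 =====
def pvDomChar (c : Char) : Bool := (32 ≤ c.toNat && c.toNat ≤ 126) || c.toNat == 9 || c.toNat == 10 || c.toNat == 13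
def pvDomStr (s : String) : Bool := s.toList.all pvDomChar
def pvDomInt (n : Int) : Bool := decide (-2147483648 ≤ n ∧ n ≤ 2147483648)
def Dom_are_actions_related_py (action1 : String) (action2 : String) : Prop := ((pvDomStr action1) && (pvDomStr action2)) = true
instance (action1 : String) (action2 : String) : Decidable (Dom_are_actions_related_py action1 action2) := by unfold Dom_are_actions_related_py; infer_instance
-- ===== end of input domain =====

-- B replaces A's per-call loop over group sets by a flat action->group-index dict built once; idiomatic, same results.


-- ===== PORT A =====
-- the five related-action groups, as Python sets
def pvRelatedGroups : List (PySem.Set String) :=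
  [ PySem.Set.ofList ["data_access", "access_resource", "read_data", "query_data"],
    PySem.Set.ofList ["modify_settings", "update_configuration", "change_preferences"],
    PySem.Set.ofList ["generate_content", "create_content", "produce_output"],
    PySem.Set.ofList ["help_user", "assist_user", "provide_assistance"],
    PySem.Set.ofList ["analyze_data", "process_data", "compute", "analyze"] ]

-- the 'for group in related_groups: if …: return True' loop
def pvLoopA (action1 action2 : String) : List (PySem.Set String) → Bool
  | [] => false
  | g :: rest =>
      if PySem.Set.contains g action1 && PySem.Set.contains g action2 then true
      else pvLoopA action1 action2 rest

def are_actions_related_py (action1 : String) (action2 : String) : Bool :=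
  pvLoopA action1 action2 pvRelatedGroups

-- ===== PORT B =====
def pvRelatedGroupsB : List (List String) :=
  [ ["data_access", "access_resource", "read_data", "query_data"],
    ["modify_settings", "update_configuration", "change_preferences"],
    ["generate_content", "create_content", "produce_output"],
    ["help_user", "assist_user", "provide_assistance"],
    ["analyze_data", "process_data", "compute", "analyze"] ]

-- {a: i for i, g in enumerate(_RELATED_GROUPS) for a in g}
def pvActionToGroup : PySem.Dict String Int :=
  (PySem.List.enumerate pvRelatedGroupsB).foldl
    (fun d ig => ig.2.foldl (fun d a => d.insert a ig.1) d) PySem.Dict.empty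

def are_actions_related_py_alt (action1 : String) (action2 : String) : Bool :=
  match pvActionToGroup.get? action1 with
  | none => false
  | some g1 => some g1 == pvActionToGroup.get? action2

-- ===== PRECONDITION & SPEC =====
def Spec_are_actions_related_py (action1 : String) (action2 : String) (out : Bool) : Prop := out = are_actions_related_py_alt action1 action2
instance (action1 : String) (action2 : String) (out : Bool) : Decidable (Spec_are_actions_related_py action1 action2 out) := by unfold Spec_are_actions_related_py; infer_instance

-- ===== CLAIM (what is proved, stated in full; the proofs are below) =====
def Claim_equal_are_actions_related_py : Prop := ∀ (action1 : String) (action2 : String), Dom_are_actions_related_py action1 action2 → Spec_are_actions_related_py action1 action2 (are_actions_related_py action1 action2)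

-- ===== LEMMAS AND PROOFS =====
-- the 17 actions that occur in any group
def pvAllActions : List String :=
  [ "data_access", "access_resource", "read_data", "query_data",
    "modify_settings", "update_configuration", "change_preferences",
    "generate_content", "create_content", "produce_output",
    "help_user", "assist_user", "provide_assistance",
    "analyze_data", "process_data", "compute", "analyze" ]

theorem pvA_out1 (a1 a2 : String) (h : a1 ∉ pvAllActions) :
    are_actions_related_py a1 a2 = false := by
  simp [pvAllActions] at h
  simp [are_actions_related_py, pvRelatedGroups, pvLoopA, PySem.Set.contains,
        PySem.Set.ofList, PySem.Set.add, h]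

theorem pvA_out2 (a1 a2 : String) (h : a2 ∉ pvAllActions) :
    are_actions_related_py a1 a2 = false := by
  simp [pvAllActions] at h
  simp [are_actions_related_py, pvRelatedGroups, pvLoopA, PySem.Set.contains,
        PySem.Set.ofList, PySem.Set.add, h]

theorem pvDictEval : pvActionToGroup = PySem.Dict.mk
  [("data_access", (0 : Int)), ("access_resource", (0 : Int)), ("read_data", (0 : Int)), ("query_data", (0 : Int)), ("modify_settings", (1 : Int)), ("update_configuration", (1 : Int)), ("change_preferences", (1 : Int)), ("generate_content", (2 : Int)), ("create_content", (2 : Int)), ("produce_output", (2 : Int)), ("help_user", (3 : Int)), ("assist_user", (3 : Int)), ("provide_assistance", (3 : Int)), ("analyze_data", (4 : Int)), ("process_data", (4 : Int)), ("compute", (4 : Int)), ("analyze", (4 : Int))] := by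
  decide

theorem pvGet_none (a : String) (h : a ∉ pvAllActions) :
    pvActionToGroup.get? a = none := by
  simp [pvAllActions] at h
  obtain ⟨h1,h2,h3,h4,h5,h6,h7,h8,h9,h10,h11,h12,h13,h14,h15,h16,h17⟩ := h
  rw [pvDictEval]
  simp [Ne.symm h1, Ne.symm h2, Ne.symm h3, Ne.symm h4,
        Ne.symm h5, Ne.symm h6, Ne.symm h7, Ne.symm h8, Ne.symm h9, Ne.symm h10,
        Ne.symm h11, Ne.symm h12, Ne.symm h13, Ne.symm h14, Ne.symm h15,
        Ne.symm h16, Ne.symm h17, PySem.Dict.get?]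

theorem pvB_out1 (a1 a2 : String) (h : a1 ∉ pvAllActions) :
    are_actions_related_py_alt a1 a2 = false := by
  simp [are_actions_related_py_alt, pvGet_none a1 h]

theorem pvB_out2 (a1 a2 : String) (h : a2 ∉ pvAllActions) :
    are_actions_related_py_alt a1 a2 = false := by
  simp [are_actions_related_py_alt, pvGet_none a2 h]
  split <;> simp

-- for the finitely many known actions, both programs agree (checked by evaluation)
theorem pvAll_agree : ∀ x ∈ pvAllActions, ∀ y ∈ pvAllActions,
    are_actions_related_py x y = are_actions_related_py_alt x y := by decide

-- ===== VERDICT (by name: the statement is the Claim_ definition above) =====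
theorem are_actions_related_py_spec : Claim_equal_are_actions_related_py := by
  intro a1 a2 _
  unfold Spec_are_actions_related_py
  by_cases h1 : a1 ∈ pvAllActions
  · by_cases h2 : a2 ∈ pvAllActions
    · exact pvAll_agree a1 h1 a2 h2
    · rw [pvA_out2 a1 a2 h2, pvB_out2 a1 a2 h2]
  · rw [pvA_out1 a1 a2 h1, pvB_out1 a1 a2 h1]
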